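-- pv_equiv track=rewrite | github.com/johnson-li/Artemis | experiment/gcloud/gce_utils.py | instances_already_created
-- ===== SOURCE A (Python) =====
-- def get_instance_zone(instance):
--     return instance['zone'].split('/')[-1]
--
-- def instances_already_created(zones: list, instances):
--     to_be_deleted = []
--     left = zones.copy()
--     for zone in set([get_instance_zone(i) for i in instances]):
--         if zone in left:
--             left.remove(zone)
--         else:
--             to_be_deleted.append(zone)
--     return len(left) == 0 and len(to_be_deleted) == 0
-- ===== SOURCE B (Python) =====
-- def get_instance_zone(instance):
--     return instance['zone'].split('/')[-1]
--
-- def instances_already_created(zones: list, instances):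
--     iz = {get_instance_zone(i) for i in instances}
--     return set(zones) == iz and len(zones) == len(iz)
-- ===== Notes on version B (the rewrite author's own statement) =====
-- stated objective: simpler
-- what changed: Replaces A's destructive remove-loop over a copied zones list with one pure set comparison: set(zones) == {instance zones} plus a length check that rules out duplicate zones.
import Mathlib
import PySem

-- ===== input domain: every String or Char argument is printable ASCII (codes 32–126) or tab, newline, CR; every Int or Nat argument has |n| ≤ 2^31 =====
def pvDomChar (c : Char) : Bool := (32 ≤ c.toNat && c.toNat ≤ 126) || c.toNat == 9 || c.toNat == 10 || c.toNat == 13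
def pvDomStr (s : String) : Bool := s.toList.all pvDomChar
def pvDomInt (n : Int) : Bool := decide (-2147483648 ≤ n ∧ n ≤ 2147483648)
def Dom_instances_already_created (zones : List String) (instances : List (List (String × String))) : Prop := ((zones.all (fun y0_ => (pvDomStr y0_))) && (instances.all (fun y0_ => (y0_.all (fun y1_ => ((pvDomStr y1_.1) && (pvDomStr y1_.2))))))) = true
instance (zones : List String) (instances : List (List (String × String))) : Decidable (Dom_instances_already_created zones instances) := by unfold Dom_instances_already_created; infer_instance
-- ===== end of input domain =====

-- B replaces A's destructive remove-loop over a copied zones list with a pure set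
-- comparison plus a duplicate-excluding length check (objective: simpler).

-- ===== PORT A =====
-- instance['zone'] is a dict lookup (first match); under Pre_ the key is present, so
-- the dict lookup is the first match (List.lookup); the .getD "" defaults are never taken. split('/') never returns [], so [-1] is exact.
def get_instance_zone (inst : List (String × String)) : String :=
  (PySem.List.pyGet? ((PySem.Str.split? ((List.lookup "zone" inst).getD "") "/").getD []) (-1)).getD ""

def instances_already_created (zones : List String) (instances : List (List (String × String))) : Bool :=
  let st := (PySem.Set.ofList (instances.map get_instance_zone)).foldl
    (fun (st : List String × List String) zone =>
      if st.2.contains zone then (st.1, st.2.erase zone) else (st.1 ++ [zone], st.2))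
    (([] : List String), zones)
  decide (st.2.length = 0) && decide (st.1.length = 0)

-- ===== PORT B =====
def instances_already_created_alt (zones : List String) (instances : List (List (String × String))) : Bool :=
  let iz := PySem.Set.ofList (instances.map get_instance_zone)
  PySem.Set.equal (PySem.Set.ofList zones) iz && decide (zones.length = PySem.Set.len iz)

-- ===== PRECONDITION & SPEC =====
-- A raises KeyError when some instance lacks the 'zone' key; exactly those inputs are excluded.
def Pre_instances_already_created (zones : List String) (instances : List (List (String × String))) : Prop :=
  ∀ i ∈ instances, (List.lookup "zone" i).isSome = true
instance (zones : List String) (instances : List (List (String × String))) : Decidable (Pre_instances_already_created zones instances) := by unfold Pre_instances_already_created; infer_instance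

def pvWitness_instances_already_created : List String × (List (List (String × String))) :=
  (["a", "b"], [[("zone", "p/a")], [("zone", "p/b")]])

def Spec_instances_already_created (zones : List String) (instances : List (List (String × String))) (out : Bool) : Prop := out = instances_already_created_alt zones instances
instance (zones : List String) (instances : List (List (String × String))) (out : Bool) : Decidable (Spec_instances_already_created zones instances out) := by unfold Spec_instances_already_created; infer_instance

-- ===== CLAIM (what is proved, stated in full; the proofs are below) =====
def Claim_equal_instances_already_created : Prop := ∀ (zones : List String) (instances : List (List (String × String))), Dom_instances_already_created zones instances → Pre_instances_already_created zones instances → Spec_instances_already_created zones instances (instances_already_created zones instances)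

-- ===== LEMMAS AND PROOFS =====

-- A's loop, unrolled: the final `left` is zones.diff S and the final `to_be_deleted`
-- collects the S-elements missing from zones (S nodup makes the shrinking-left test
-- equivalent to a test against the original zones).
theorem loopA_eq (S : List String) (hnd : S.Nodup) :
    ∀ (zones acc : List String),
      S.foldl (fun (st : List String × List String) zone =>
          if st.2.contains zone then (st.1, st.2.erase zone) else (st.1 ++ [zone], st.2))
        (acc, zones)
      = (acc ++ S.filter (fun z => !zones.contains z), zones.diff S) := by
  induction S with
  | nil => intro zones acc; simp
  | cons z rest ih =>
    intro zones acc
    obtain ⟨hz, hrest⟩ := List.nodup_cons.mp hnd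
    have hfc : rest.filter (fun y => !(zones.erase z).contains y)
        = rest.filter (fun y => !zones.contains y) := by
      apply List.filter_congr
      intro y hy
      have hne : y ≠ z := fun h => hz (h ▸ hy)
      simp [List.mem_erase_of_ne hne]
    simp only [List.foldl_cons, List.diff_cons, List.filter_cons]
    by_cases h : z ∈ zones
    · rw [if_pos (by simpa using h), ih hrest (zones.erase z) acc, hfc,
        if_neg (by simpa using h)]
    · rw [if_neg (by simpa using h), ih hrest zones (acc ++ [z]),
        List.erase_of_not_mem h, if_pos (by simpa using h)]
      simp

theorem diff_nil_iff_count (l₁ l₂ : List String) :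
    l₁.diff l₂ = [] ↔ ∀ a, l₁.count a ≤ l₂.count a := by
  constructor
  · intro h a
    have := List.count_diff a l₁ l₂
    rw [h] at this
    simp at this
    omega
  · intro h
    rw [List.eq_nil_iff_forall_not_mem]
    intro a ha
    have h1 : 0 < (l₁.diff l₂).count a := List.count_pos_iff.mpr ha
    rw [List.count_diff] at h1
    have := h a
    omega

-- ===== VERDICT (by name: the statement is the Claim_ definition above) =====
theorem instances_already_created_spec : Claim_equal_instances_already_created := by
  intro zones instances _ _
  unfold Spec_instances_already_created instances_already_created instances_already_created_alt
  set S := PySem.Set.ofList (instances.map get_instance_zone) with hS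
  have hnd : S.Nodup := PySem.Set.nodup_ofList _
  rw [loopA_eq S hnd zones []]
  simp only [List.nil_append, List.length_eq_zero_iff, PySem.Set.len]
  rw [Bool.eq_iff_iff]
  simp only [Bool.and_eq_true, decide_eq_true_eq, PySem.Set.equal_iff, PySem.Set.mem_ofList]
  constructor
  · rintro ⟨hdiff, hfilt⟩
    have hsub : List.Subperm zones S := List.subperm_iff_count.mpr ((diff_nil_iff_count zones S).mp hdiff)
    have hSsub : ∀ z ∈ S, z ∈ zones := by
      intro z hz
      by_contra hzn
      have : z ∈ S.filter (fun z => !zones.contains z) := by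
        simp [List.mem_filter, hz, hzn]
      rw [hfilt] at this; simp at this
    have hperm : List.Perm zones S :=
      hsub.perm_of_length_le ((hnd.subperm hSsub).length_le)
    exact ⟨fun x => ⟨fun hx => hperm.mem_iff.mp hx, fun hx => hSsub x hx⟩, by exact_mod_cast hperm.length_eq⟩
  · rintro ⟨hmem, hlenI⟩
    have hlen : zones.length = S.length := by exact_mod_cast hlenI
    have hSsub : List.Subperm S zones := hnd.subperm (fun z hz => (hmem z).mpr hz)
    have hperm : List.Perm S zones := hSsub.perm_of_length_le (le_of_eq hlen)
    constructor
    · exact (diff_nil_iff_count zones S).mpr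
        (List.subperm_iff_count.mp (hperm.symm.subperm))
    · rw [List.eq_nil_iff_forall_not_mem]
      intro z hzf
      have := List.mem_filter.mp hzf
      simp at this
      exact this.2 ((hmem z).mpr this.1)
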